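-- pv_equiv track=rewrite | github.com/TEXPEMKOM/python | DOMALLIKA-5.3.py | create_hashtag
-- ===== SOURCE A (Python) =====
-- import string
--
-- def create_hashtag(input_string):
--     # Удаляем знаки пунктуации
--     translator = str.maketrans('', '', string.punctuation)
--     clean_string = input_string.translate(translator)
--
--     # Розбиваем на слова, удаляем пробельі и преобразование каждого слова начитнаться с большой буквьі
--     words = clean_string.split()
--     capitalized_words = [word.capitalize() for word in words]
--
--     # формируем хештег
--     hashtag = '#' + ''.join(capitalized_words)
--
--     # если длина больше 140 символов, обрезаем до 140-го
--     if len(hashtag) > 140: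
--         hashtag = hashtag[:140]
--
--     return hashtag
-- ===== SOURCE B (Python) =====
-- import string
--
-- def create_hashtag(input_string):
--     parts = []
--     buf = []
--     for ch in input_string:
--         if ch in string.punctuation:
--             continue
--         if ch.isspace():
--             if buf:
--                 parts.append(''.join(buf).capitalize())
--                 buf = []
--         else:
--             buf.append(ch)
--     if buf:
--         parts.append(''.join(buf).capitalize())
--     return ('#' + ''.join(parts))[:140]
-- ===== Notes on version B (the rewrite author's own statement) =====
-- stated objective: alternative
-- what changed: Replaced A's four-stage pipeline (translate to strip punctuation, split, per-word capitalize comprehension, join) with a single pass over the characters that maintains a current-word buffer, flushing it capitalized on whitespace.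
import Mathlib
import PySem

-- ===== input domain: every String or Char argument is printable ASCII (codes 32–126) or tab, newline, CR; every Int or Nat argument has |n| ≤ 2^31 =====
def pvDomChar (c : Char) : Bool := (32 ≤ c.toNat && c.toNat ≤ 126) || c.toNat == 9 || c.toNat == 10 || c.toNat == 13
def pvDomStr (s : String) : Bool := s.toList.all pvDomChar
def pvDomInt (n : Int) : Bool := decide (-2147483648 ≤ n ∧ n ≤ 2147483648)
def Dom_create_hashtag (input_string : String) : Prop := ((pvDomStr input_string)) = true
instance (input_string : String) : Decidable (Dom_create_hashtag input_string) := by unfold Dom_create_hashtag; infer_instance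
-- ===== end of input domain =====

-- B fuses A's translate→split→capitalize→join pipeline into one pass with a word buffer (objective: alternative/simpler decomposition; same cost).

-- the characters of string.punctuation: ASCII codes 33–47, 58–64, 91–96, 123–126
def pvIsPunct (c : Char) : Bool :=
  (33 ≤ c.toNat && c.toNat ≤ 47) || (58 ≤ c.toNat && c.toNat ≤ 64) ||
  (91 ≤ c.toNat && c.toNat ≤ 96) || (123 ≤ c.toNat && c.toNat ≤ 126)

-- word.capitalize(): first char uppercased, rest lowered (exact on ASCII)
def pvCap (w : List Char) : List Char :=
  match w with
  | [] => []
  | c :: cs => PySem.Chars.upperChar c :: PySem.Chars.lower cs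

-- ===== PORT A =====
def create_hashtag (input_string : String) : String :=
  -- clean_string = input_string.translate(maketrans('', '', string.punctuation))
  let clean_string : List Char := input_string.toList.filter (fun c => !pvIsPunct c)
  -- words = clean_string.split()
  let words := PySem.Chars.split₀ clean_string
  -- capitalized_words = [word.capitalize() for word in words]
  let capitalized_words := words.map pvCap
  -- hashtag = '#' + ''.join(capitalized_words)
  let hashtag : List Char := '#' :: PySem.Chars.join [] capitalized_words
  -- if len(hashtag) > 140: hashtag = hashtag[:140]
  let hashtag := if hashtag.length > 140 then PySem.List.slice hashtag none (some 140) else hashtag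
  String.mk hashtag

-- ===== PORT B =====
-- single pass: skip punctuation, flush the word buffer (capitalized) on whitespace
def pvLoop (cs : List Char) (buf : List Char) (parts : List (List Char)) : List (List Char) :=
  match cs with
  | [] => if buf.isEmpty then parts else parts ++ [pvCap buf]
  | c :: rest =>
    if pvIsPunct c then pvLoop rest buf parts
    else if PySem.Chars.isspace c then
      if buf.isEmpty then pvLoop rest [] parts else pvLoop rest [] (parts ++ [pvCap buf])
    else pvLoop rest (buf ++ [c]) parts

def create_hashtag_alt (input_string : String) : String :=
  let parts := pvLoop input_string.toList [] []
  -- ('#' + ''.join(parts))[:140]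
  String.mk (PySem.List.slice ('#' :: parts.flatten) none (some 140))

-- ===== PRECONDITION & SPEC =====
def Spec_create_hashtag (input_string : String) (out : String) : Prop := out = create_hashtag_alt input_string
instance (input_string : String) (out : String) : Decidable (Spec_create_hashtag input_string out) := by unfold Spec_create_hashtag; infer_instance

-- ===== CLAIM (what is proved, stated in full; the proofs are below) =====
def Claim_equal_create_hashtag : Prop := ∀ (input_string : String), Dom_create_hashtag input_string → Spec_create_hashtag input_string (create_hashtag input_string)

-- ===== LEMMAS AND PROOFS =====

-- split₀.go with accumulator acc prepends acc.reverse to the result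
theorem go_acc (cs cur : List Char) (acc : List (List Char)) :
    PySem.Chars.split₀.go cs cur acc = acc.reverse ++ PySem.Chars.split₀.go cs cur [] := by
  induction cs generalizing cur acc with
  | nil =>
    simp only [PySem.Chars.split₀.go]
    split_ifs <;> simp
  | cons c rest ih =>
    simp only [PySem.Chars.split₀.go]
    split_ifs with h1 h2
    · rw [ih [] acc]
    · rw [ih [] (cur.reverse :: acc), ih [] [cur.reverse]]
      simp
    · exact ih _ _

-- the fused loop equals: filter punctuation, split on whitespace, capitalize each word
theorem pvLoop_eq (cs : List Char) (buf : List Char) (parts : List (List Char)) :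
    pvLoop cs buf parts =
      parts ++ (PySem.Chars.split₀.go (cs.filter (fun c => !pvIsPunct c)) buf.reverse []).map pvCap := by
  induction cs generalizing buf parts with
  | nil =>
    simp only [pvLoop, List.filter_nil, PySem.Chars.split₀.go, List.isEmpty_reverse,
      List.reverse_reverse]
    split_ifs <;> simp
  | cons c rest ih =>
    by_cases hp : pvIsPunct c = true
    · simp only [pvLoop, if_pos hp, List.filter_cons, hp, Bool.not_true, if_neg (by simp : ¬ (false = true))]
      exact ih buf parts
    · have hfil : (c :: rest).filter (fun c => !pvIsPunct c)
          = c :: rest.filter (fun c => !pvIsPunct c) := by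
        simp [List.filter_cons, hp]
      by_cases hs : PySem.Chars.isspace c = true
      · by_cases hb : buf.isEmpty = true
        · have hb' : buf = [] := by simpa using hb
          subst hb'
          simp only [pvLoop, if_neg hp, if_pos hs, if_pos rfl, hfil,
            PySem.Chars.split₀.go, List.reverse_nil, List.isEmpty_nil]
          exact ih [] parts
        · simp only [pvLoop, if_neg hp, if_pos hs, if_neg hb, hfil,
            PySem.Chars.split₀.go, List.isEmpty_reverse, if_neg hb, List.reverse_reverse]
          rw [ih [] (parts ++ [pvCap buf]), go_acc _ [] [buf]]
          simp
      · simp only [pvLoop, if_neg hp, if_neg hs, hfil, PySem.Chars.split₀.go, if_neg hs]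
        rw [ih (buf ++ [c]) parts]
        simp

theorem join_empty (l : List (List Char)) : PySem.Chars.join [] l = l.flatten := by
  induction l with
  | nil => simp [PySem.Chars.join_nil]
  | cons p rest ih =>
    cases rest with
    | nil => simp [PySem.Chars.join_singleton]
    | cons q t => rw [PySem.Chars.join_cons_cons, List.flatten_cons, ih]; simp

theorem core_eq (s : List Char) :
    (pvLoop s [] []).flatten =
      PySem.Chars.join [] ((PySem.Chars.split₀ (s.filter (fun c => !pvIsPunct c))).map pvCap) := by
  rw [pvLoop_eq, join_empty]
  rfl

-- ===== VERDICT (by name: the statement is the Claim_ definition above) =====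
theorem create_hashtag_spec : Claim_equal_create_hashtag := by
  intro s _
  unfold Spec_create_hashtag create_hashtag create_hashtag_alt
  simp only [core_eq]
  rw [PySem.List.slice_to _ (by norm_num)]
  split_ifs with h
  · rfl
  · rw [List.take_of_length_le (by omega)]
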